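-- pv_equiv track=rewrite | github.com/juhegue/busca | busca.py | buscapalabra
-- ===== SOURCE A (Python) =====
-- letras_digitos = ([chr(i) for i in range(ord("0"), ord("9")+1)])
--
-- def buscapalabra(cadena, linea, busca):
--     ok = True
--     if busca:
--         ok = False
--         pos = -1
--         while True:
--             lon = len(cadena)
--             pos = linea.find(cadena, pos + 1)
--             if pos < 0:
--                 break
--             izq = linea[pos-1:pos]
--             der = linea[pos+lon:pos+lon+1]
--             if izq not in letras_digitos and der not in letras_digitos:
--                 ok = True
--                 break
--     return ok
-- ===== SOURCE B (Python) =====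
-- DIGITOS = set("0123456789")
--
-- def buscapalabra(cadena, linea, busca):
--     if not busca:
--         return True
--     n, m = len(linea), len(cadena)
--     return any(
--         linea[i:i+m] == cadena
--         and (i == 0 or linea[i-1] not in DIGITOS)
--         and (i + m >= n or linea[i+m] not in DIGITOS)
--         for i in range(n - m + 1)
--     )
-- ===== Notes on version B (the rewrite author's own statement) =====
-- stated objective: simpler
-- what changed: Replaces A's stateful while-loop over str.find restarts with neighbour slices by a single any() over all candidate start positions, testing the substring match and the two boundary characters directly by index.
import Mathlib
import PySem

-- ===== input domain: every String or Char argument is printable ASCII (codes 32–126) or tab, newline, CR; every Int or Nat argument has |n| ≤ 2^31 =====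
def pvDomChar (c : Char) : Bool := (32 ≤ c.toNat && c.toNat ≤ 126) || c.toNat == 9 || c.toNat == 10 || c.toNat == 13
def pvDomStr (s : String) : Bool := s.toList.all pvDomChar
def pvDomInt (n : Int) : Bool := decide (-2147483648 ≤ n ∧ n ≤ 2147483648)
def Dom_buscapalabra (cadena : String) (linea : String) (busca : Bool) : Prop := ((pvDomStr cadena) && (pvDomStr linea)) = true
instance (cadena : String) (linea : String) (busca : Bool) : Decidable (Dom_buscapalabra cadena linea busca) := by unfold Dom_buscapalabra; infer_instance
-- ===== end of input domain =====

-- B replaces A's stateful while-loop over str.find restarts (with neighbour slices) by a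
-- single any() over all candidate start positions; equivalence of the return values is proved.

-- ===== PORT A =====
-- letras_digitos = [chr(i) for i in range(ord("0"), ord("9")+1)]  (a list of 1-char strings ⇒ singleton char lists)
def letrasDigitos : List (List Char) := (PySem.List.pyRange 48 58 1).map (fun i => [Char.ofNat i.toNat])

-- the 'while True' loop of A; the fuel only makes the identical computation total
-- (pos strictly increases and stays ≤ len(linea), so len(linea)+2 steps always suffice)
def buscaGo (cadena linea : List Char) (pos : Int) (fuel : Nat) : Bool :=
  match fuel with
  | 0 => false
  | fuel + 1 =>
    let lon : Int := cadena.length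
    let pos' := PySem.Chars.findFrom linea cadena (pos + 1) none
    if pos' < 0 then false
    else
      let izq := PySem.List.slice linea (some (pos' - 1)) (some pos')
      let der := PySem.List.slice linea (some (pos' + lon)) (some (pos' + lon + 1))
      if izq ∉ letrasDigitos ∧ der ∉ letrasDigitos then true
      else buscaGo cadena linea pos' fuel

def buscapalabra (cadena : String) (linea : String) (busca : Bool) : Bool :=
  if busca then buscaGo cadena.toList linea.toList (-1) (linea.toList.length + 2)
  else true

-- ===== PORT B =====
def digitos : List Char := "0123456789".toList

def buscapalabra_alt (cadena : String) (linea : String) (busca : Bool) : Bool :=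
  if !busca then true
  else
    let c := cadena.toList
    let l := linea.toList
    let n : Int := l.length
    let m : Int := c.length
    (PySem.List.pyRange 0 (n - m + 1) 1).any (fun i =>
      decide (PySem.List.slice l (some i) (some (i + m)) = c
        ∧ (i = 0 ∨ PySem.List.pyGetD l (i - 1) ' ' ∉ digitos)
        ∧ (n ≤ i + m ∨ PySem.List.pyGetD l (i + m) ' ' ∉ digitos)))

-- ===== PRECONDITION & SPEC =====
def Spec_buscapalabra (cadena : String) (linea : String) (busca : Bool) (out : Bool) : Prop := out = buscapalabra_alt cadena linea busca
instance (cadena : String) (linea : String) (busca : Bool) (out : Bool) : Decidable (Spec_buscapalabra cadena linea busca out) := by unfold Spec_buscapalabra; infer_instance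

-- ===== CLAIM (what is proved, stated in full; the proofs are below) =====
def Claim_equal_buscapalabra : Prop := ∀ (cadena : String) (linea : String) (busca : Bool), Dom_buscapalabra cadena linea busca → Spec_buscapalabra cadena linea busca (buscapalabra cadena linea busca)

-- ===== LEMMAS AND PROOFS =====

-- the common characterisation of an accepted position i
def GoodAt (c l : List Char) (i : Nat) : Prop :=
  i + c.length ≤ l.length ∧ c <+: l.drop i
  ∧ (i = 0 ∨ l.getD (i - 1) ' ' ∉ digitos)
  ∧ (i + c.length = l.length ∨ l.getD (i + c.length) ' ' ∉ digitos)

lemma letras_eq : letrasDigitos = digitos.map (fun ch => [ch]) := by decide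

lemma nil_not_mem_letras : ([] : List Char) ∉ letrasDigitos := by decide

lemma singleton_mem_letras (ch : Char) : [ch] ∈ letrasDigitos ↔ ch ∈ digitos := by
  rw [letras_eq]; simp

lemma findFrom_gt_len (l c : List Char) (k : Int) (h : (l.length : Int) < k) :
    PySem.Chars.findFrom l c k none = -1 := by
  simp only [PySem.Chars.findFrom]
  split_ifs with h1 h2 h3 <;> omega

lemma izq_zero (l : List Char) : PySem.List.slice l (some (-1 : Int)) (some 0) = ([] : List Char) := by
  apply List.eq_nil_of_length_eq_zero
  rw [PySem.List.length_slice]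
  simp

lemma slice_one (l : List Char) (j : Nat) (h : j < l.length) :
    PySem.List.slice l (some (j : Int)) (some ((j : Int) + 1)) = [l[j]] := by
  rw [show ((j:Int)+1) = ((j:Int) + ((1:Nat):Int)) by norm_num, PySem.List.slice_natCast_add,
    List.drop_eq_getElem_cons h, List.take_succ_cons, List.take_zero]

lemma slice_past (l : List Char) (a b : Int) (h : (l.length : Int) ≤ a) (hb : 0 ≤ b) :
    PySem.List.slice l (some a) (some b) = ([] : List Char) := by
  rw [PySem.List.slice_toNat _ (by omega) hb, List.drop_eq_nil_of_le (by omega)]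
  simp

lemma izq_ok (l : List Char) (j : Nat) (hj : j ≤ l.length) :
    PySem.List.slice l (some ((j : Int) - 1)) (some (j : Int)) ∉ letrasDigitos ↔
      (j = 0 ∨ l.getD (j - 1) ' ' ∉ digitos) := by
  cases j with
  | zero =>
    rw [show (((0:Nat):Int) - 1) = (-1 : Int) by norm_num, show (((0:Nat):Int)) = (0:Int) by norm_num,
      izq_zero]
    simp [nil_not_mem_letras]
  | succ j' =>
    have hj' : j' < l.length := by omega
    rw [show (((j'+1:Nat):Int) - 1) = ((j':Nat):Int) by push_cast; ring,
      show (((j'+1:Nat):Int)) = ((j':Nat):Int) + 1 by push_cast; ring,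
      slice_one l j' hj', singleton_mem_letras]
    simp [List.getElem?_eq_getElem hj']

lemma der_ok (l : List Char) (j m : Nat) (h : j + m ≤ l.length) :
    PySem.List.slice l (some ((j : Int) + (m : Int))) (some ((j : Int) + (m : Int) + 1)) ∉ letrasDigitos ↔
      (j + m = l.length ∨ l.getD (j + m) ' ' ∉ digitos) := by
  rcases eq_or_lt_of_le h with heq | hlt
  · rw [slice_past l _ _ (by omega) (by positivity)]
    simp [nil_not_mem_letras, heq]
  · rw [show ((j:Int) + (m:Int)) = (((j+m:Nat)):Int) by push_cast; ring,
      slice_one l (j+m) hlt, singleton_mem_letras]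
    have : j + m ≠ l.length := by omega
    simp [List.getElem?_eq_getElem hlt, this]

lemma buscaGo_iff (c l : List Char) (fuel : Nat) (pos : Int)
    (hpos : -1 ≤ pos) (hfuel : (l.length : Int) + 1 - pos ≤ fuel) :
    buscaGo c l pos fuel = true ↔ ∃ i : Nat, pos < (i : Int) ∧ GoodAt c l i := by
  induction fuel generalizing pos with
  | zero =>
    simp only [buscaGo]
    constructor
    · intro h; cases h
    · rintro ⟨i, hi, hle, -, -⟩
      exfalso; omega
  | succ fuel ih =>
    have hk0 : 0 ≤ pos + 1 := by omega
    by_cases hbig : (l.length : Int) < pos + 1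
    · have hj := findFrom_gt_len l c (pos + 1) hbig
      simp only [buscaGo, hj]
      norm_num
      rintro i hi ⟨hle, -, -, -⟩
      omega
    · set k := (pos + 1).toNat with hkdef
      have hk : ((k : Int)) = pos + 1 := Int.toNat_of_nonneg hk0
      have hkle : k ≤ l.length := by omega
      simp only [buscaGo]
      set j := PySem.Chars.findFrom l c (pos + 1) none with hjdef
      have hjk : j = PySem.Chars.findFrom l c (k : Int) none := by rw [hk]
      by_cases hneg : j = -1
      · rw [if_pos (by omega : j < 0)]
        constructor
        · intro h; cases h
        · rintro ⟨i, hi, -, hpre, -, -⟩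
          exfalso
          have hnin := (PySem.Chars.findFrom_natCast_eq_neg_one_iff l c k hkle).mp (hjk ▸ hneg)
          apply hnin
          have hik : k ≤ i := by omega
          have : l.drop i = (l.drop k).drop (i - k) := by
            rw [List.drop_drop]; congr 1; omega
          rw [this] at hpre
          exact hpre.isInfix.trans (List.drop_suffix (i - k) (l.drop k)).isInfix
      · obtain ⟨hkj, hprej, hmin⟩ :=
          PySem.Chars.findFrom_natCast_spec l c k hkle (by rw [← hjk]; exact hneg)
        rw [← hjk] at hkj hprej hmin
        have hj0 : 0 ≤ j := by omega
        set j' := j.toNat with hj'def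
        have hj' : ((j' : Nat) : Int) = j := Int.toNat_of_nonneg hj0
        have hjlen : j' + c.length ≤ l.length := by
          by_cases hc : c = []
          · subst hc
            have : j = (k : Int) := by
              rw [hjk, PySem.Chars.findFrom_natCast l [] k hkle, PySem.Chars.find_nil]
              simp
            simp only [List.length_nil]
            omega
          · have hcpos : 0 < c.length := List.length_pos_of_ne_nil hc
            have hlen := hprej.length_le
            rw [List.length_drop] at hlen
            omega
        have hprej' : c <+: l.drop j' := hprej
        rw [if_neg (by omega : ¬ j < 0), ← hj']
        have hizq := izq_ok l j' (by omega)
        have hder := der_ok l j' c.length hjlen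
        by_cases hgood : (j' = 0 ∨ l.getD (j' - 1) ' ' ∉ digitos) ∧
            (j' + c.length = l.length ∨ l.getD (j' + c.length) ' ' ∉ digitos)
        · rw [if_pos ⟨hizq.mpr hgood.1, by
            rw [show ((j' : Int) + (c.length : Int) + 1) = ((j' : Int) + (c.length : Int)) + 1 from rfl]
            exact hder.mpr hgood.2⟩]
          constructor
          · intro _
            exact ⟨j', by omega, hjlen, hprej', hgood.1, hgood.2⟩
          · intro _; rfl
        · rw [if_neg (by
            intro ⟨h1, h2⟩
            exact hgood ⟨hizq.mp h1, hder.mp h2⟩)]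
          rw [ih (j' : Int) (by omega) (by omega)]
          constructor
          · rintro ⟨i, hi, hg⟩
            exact ⟨i, by omega, hg⟩
          · rintro ⟨i, hi, hg⟩
            refine ⟨i, ?_, hg⟩
            rcases lt_trichotomy i j' with hlt | heq | hgt
            · exfalso
              exact hmin i (by omega) (by omega) hg.2.1
            · exfalso
              subst heq
              exact hgood ⟨hg.2.2.1, hg.2.2.2⟩
            · omega

lemma alt_iff (cadena linea : String) :
    buscapalabra_alt cadena linea true = true ↔ ∃ i : Nat, GoodAt cadena.toList linea.toList i := by
  simp only [buscapalabra_alt, Bool.not_true, Bool.false_eq_true, if_false,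
    List.any_eq_true, PySem.List.mem_pyRange_one, decide_eq_true_eq]
  set c := cadena.toList with hc
  set l := linea.toList with hl
  constructor
  · rintro ⟨x, ⟨hx0, hxlt⟩, hs, hL, hR⟩
    lift x to ℕ using hx0 with i
    rw [PySem.List.slice_natCast_add] at hs
    have hpre : c <+: l.drop i := List.prefix_iff_eq_take.mpr hs.symm
    have hlen : c.length ≤ l.length - i := by
      have := hpre.length_le; simpa using this
    have hle : i + c.length ≤ l.length := by omega
    refine ⟨i, hle, hpre, ?_, ?_⟩
    · rcases hL with h0 | hg
      · left; exact_mod_cast h0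
      · rcases Nat.eq_zero_or_pos i with h0 | hpos
        · left; exact h0
        · right
          rw [show ((i:Int) - 1) = ((i-1 : Nat):Int) by omega, PySem.List.pyGetD_natCast] at hg
          exact hg
    · rcases hR with h0 | hg
      · left; omega
      · right
        rw [show ((i:Int) + (c.length:Int)) = ((i + c.length : Nat):Int) by omega,
          PySem.List.pyGetD_natCast] at hg
        exact hg
  · rintro ⟨i, hle, hpre, hL, hR⟩
    refine ⟨(i:Int), ⟨by omega, by omega⟩, ?_, ?_, ?_⟩
    · rw [PySem.List.slice_natCast_add]
      have := List.prefix_iff_eq_take.mp hpre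
      exact this.symm
    · rcases Nat.eq_zero_or_pos i with h0 | hpos
      · left; exact_mod_cast h0
      · rcases hL with h0 | hg
        · omega
        · right
          rw [show ((i:Int) - 1) = ((i-1 : Nat):Int) by omega, PySem.List.pyGetD_natCast]
          exact hg
    · rcases hR with h0 | hg
      · left; omega
      · right
        rw [show ((i:Int) + (c.length:Int)) = ((i + c.length : Nat):Int) by omega,
          PySem.List.pyGetD_natCast]
        exact hg

-- ===== VERDICT (by name: the statement is the Claim_ definition above) =====
theorem buscapalabra_spec : Claim_equal_buscapalabra := by
  intro cadena linea busca _
  unfold Spec_buscapalabra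
  cases busca with
  | false => simp [buscapalabra, buscapalabra_alt]
  | true =>
    rw [Bool.eq_iff_iff]
    have h1 := buscaGo_iff cadena.toList linea.toList (linea.toList.length + 2) (-1)
      (le_refl _) (by push_cast; omega)
    rw [show buscapalabra cadena linea true
        = buscaGo cadena.toList linea.toList (-1) (linea.toList.length + 2) from rfl, h1, alt_iff]
    constructor
    · rintro ⟨i, _, hg⟩; exact ⟨i, hg⟩
    · rintro ⟨i, hg⟩; exact ⟨i, by omega, hg⟩
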